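-- pv_equiv track=rewrite | github.com/MrBrantCode/unitest_baseline | mut_generate/mist_train_taco/taco_7072/solution.py | can_watch_all_shows
-- ===== SOURCE A (Python) =====
-- def can_watch_all_shows(n, shows):
--     MAX_TVS = 2
--     shows.sort(key=lambda x: x[0])
--     tvs = []
--
--     for show in shows:
--         if len(tvs) == MAX_TVS:
--             if show[0] > tvs[0][1]:
--                 tvs.pop(0)
--             elif show[0] > tvs[1][1]:
--                 tvs.pop(1)
--
--         if len(tvs) == MAX_TVS:
--             return "NO"
--
--         tvs.append(show)
--
--     return "YES"
-- ===== SOURCE B (Python) =====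
-- def can_watch_all_shows(n, shows):
--     shows.sort(key=lambda x: x[0])
--     if any(sum(1 for p in shows[:k] if p[1] >= shows[k][0]) >= 2
--            for k in range(len(shows))):
--         return "NO"
--     return "YES"
-- ===== Notes on version B (the rewrite author's own statement) =====
-- stated objective: alternative
-- what changed: Replaces A's online greedy simulation of two TV slots (a mutable list with conditional pops and appends carried across the loop) by a stateless declarative test: after the same in-place sort, answer NO iff some show has at least two earlier shows whose end time reaches its start, computed by an any-over-indices with a fresh prefix count per show.
import Mathlib
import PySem

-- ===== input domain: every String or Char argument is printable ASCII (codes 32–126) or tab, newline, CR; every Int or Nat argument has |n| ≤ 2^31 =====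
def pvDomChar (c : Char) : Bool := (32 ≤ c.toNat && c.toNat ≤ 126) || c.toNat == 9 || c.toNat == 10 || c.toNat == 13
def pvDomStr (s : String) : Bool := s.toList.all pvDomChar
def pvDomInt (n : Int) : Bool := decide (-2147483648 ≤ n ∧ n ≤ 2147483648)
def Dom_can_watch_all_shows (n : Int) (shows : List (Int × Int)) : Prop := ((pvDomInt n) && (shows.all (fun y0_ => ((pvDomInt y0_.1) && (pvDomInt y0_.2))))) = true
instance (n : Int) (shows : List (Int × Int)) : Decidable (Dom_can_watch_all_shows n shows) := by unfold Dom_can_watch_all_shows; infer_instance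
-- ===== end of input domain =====

-- B replaces A's online two-TV greedy simulation by a stateless declarative test over the
-- sorted list ("some show has ≥ 2 earlier shows still running at its start"); objective:
-- alternative decomposition, not faster. Both Pythons sort `shows` in place with the same
-- key; the equivalence proved here is about the RETURN value.

-- ===== PORT A =====
-- the for-loop over the sorted shows, with the mutable list `tvs` as state
def can_watch_all_shows_go (tvs : List (Int × Int)) : List (Int × Int) → String
  | [] => "YES"
  | sh :: rest =>
    let tvs1 :=
      if tvs.length = 2 then
        if sh.1 > (PySem.List.pyGetD tvs 0 (0, 0)).2 then
          ((PySem.List.pop? tvs 0).getD ((0, 0), tvs)).2   -- tvs.pop(0); index 0 is in range here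
        else if sh.1 > (PySem.List.pyGetD tvs 1 (0, 0)).2 then
          ((PySem.List.pop? tvs 1).getD ((0, 0), tvs)).2   -- tvs.pop(1); index 1 is in range here
        else tvs
      else tvs
    if tvs1.length = 2 then "NO"
    else can_watch_all_shows_go (tvs1 ++ [sh]) rest

def can_watch_all_shows (n : Int) (shows : List (Int × Int)) : String :=
  can_watch_all_shows_go [] (PySem.List.sorted shows (fun x => x.1) false)

-- ===== PORT B =====
-- Source B's prefix count: sum(1 for p in shows[:k] if p[1] >= shows[k][0])
def pvBusy (ss : List (Int × Int)) (k : Nat) : Nat :=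
  ((PySem.List.slice ss none (some (k : Int))).filter
    (fun p => decide ((PySem.List.pyGetD ss (k : Int) (0, 0)).1 ≤ p.2))).length

def can_watch_all_shows_alt (n : Int) (shows : List (Int × Int)) : String :=
  let ss := PySem.List.sorted shows (fun x => x.1) false
  if (List.range ss.length).any (fun k => 2 ≤ pvBusy ss k) then "NO" else "YES"

-- ===== PRECONDITION & SPEC =====
def Spec_can_watch_all_shows (n : Int) (shows : List (Int × Int)) (out : String) : Prop := out = can_watch_all_shows_alt n shows
instance (n : Int) (shows : List (Int × Int)) (out : String) : Decidable (Spec_can_watch_all_shows n shows out) := by unfold Spec_can_watch_all_shows; infer_instance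

-- ===== CLAIM (what is proved, stated in full; the proofs are below) =====
def Claim_equal_can_watch_all_shows : Prop := ∀ (n : Int) (shows : List (Int × Int)), Dom_can_watch_all_shows n shows → Spec_can_watch_all_shows n shows (can_watch_all_shows n shows)

-- ===== LEMMAS AND PROOFS =====

-- number of shows in l whose end time is ≥ t
def pvCnt (l : List (Int × Int)) (t : Int) : Nat := (l.filter (fun p => decide (t ≤ p.2))).length

-- intermediate form of B: recurse over the remaining shows carrying the processed prefix
def pvBGo (done : List (Int × Int)) : List (Int × Int) → String
  | [] => "YES"
  | (s, e) :: r => if 2 ≤ pvCnt done s then "NO" else pvBGo (done ++ [(s, e)]) r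

lemma pvCnt_cons (p : Int × Int) (l : List (Int × Int)) (t : Int) :
    pvCnt (p :: l) t = (if t ≤ p.2 then 1 else 0) + pvCnt l t := by
  simp only [pvCnt, List.filter]
  split_ifs with h <;> simp [h] <;> omega

lemma pvCnt_nil (t : Int) : pvCnt [] t = 0 := rfl

lemma pvCnt_append (l l' : List (Int × Int)) (t : Int) :
    pvCnt (l ++ l') t = pvCnt l t + pvCnt l' t := by
  simp [pvCnt, List.filter_append]

lemma pvCnt_mono (l : List (Int × Int)) {s t : Int} (h : s ≤ t) : pvCnt l t ≤ pvCnt l s := by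
  induction l with
  | nil => simp [pvCnt]
  | cons p l ih => rw [pvCnt_cons, pvCnt_cons]; split_ifs <;> omega

-- A's loop equals pvBGo under the invariant: on every future start time, the TV list holds
-- exactly min 2 (number of processed shows still running)
lemma go_eq_bgo (rest : List (Int × Int)) : ∀ (tvs done : List (Int × Int)),
    rest.Pairwise (fun a b => a.1 ≤ b.1) →
    tvs.length ≤ 2 →
    (∀ x ∈ rest, pvCnt tvs x.1 = min 2 (pvCnt done x.1)) →
    can_watch_all_shows_go tvs rest = pvBGo done rest := by
  induction rest with
  | nil => intro tvs done _ _ _; simp [can_watch_all_shows_go, pvBGo]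
  | cons hd r ih =>
    obtain ⟨s, e⟩ := hd
    intro tvs done hpw hlen hcnt
    have hpw' := hpw.of_cons
    have hsle : ∀ x ∈ r, s ≤ x.1 := fun x hx => (List.pairwise_cons.mp hpw).1 x hx
    have h0 : pvCnt tvs s = min 2 (pvCnt done s) := hcnt (s, e) (by simp)
    have hcr : ∀ x ∈ r, pvCnt tvs x.1 = min 2 (pvCnt done x.1) := fun x hx => hcnt x (by simp [hx])
    clear hcnt hpw
    have key : ∀ (tvs' : List (Int × Int)), tvs'.length ≤ 2 →
        (∀ x ∈ r, pvCnt tvs' x.1 = min 2 (pvCnt (done ++ [(s, e)]) x.1)) →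
        ¬ 2 ≤ pvCnt done s →
        can_watch_all_shows_go tvs' r = pvBGo done ((s, e) :: r) := by
      intro tvs' h1 h2 hno
      rw [show pvBGo done ((s, e) :: r) = pvBGo (done ++ [(s, e)]) r by simp [pvBGo, hno]]
      exact ih tvs' _ hpw' h1 h2
    rcases tvs with _ | ⟨a, tvs⟩
    · -- tvs = []
      have hd0 : pvCnt done s = 0 := by
        have h00 : pvCnt ([] : List (Int × Int)) s = 0 := rfl
        omega
      rw [show can_watch_all_shows_go [] ((s, e) :: r) = can_watch_all_shows_go [(s, e)] r by
        norm_num [can_watch_all_shows_go]]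
      refine key [(s, e)] (by simp) ?_ (by omega)
      intro x hx
      have h2 : pvCnt done x.1 = 0 := by
        have := pvCnt_mono done (hsle x hx); omega
      rw [pvCnt_append]
      simp only [pvCnt_cons, pvCnt_nil]
      split_ifs <;> omega
    · rcases tvs with _ | ⟨b, tvs⟩
      · -- tvs = [a]
        have hd1 : pvCnt done s ≤ 1 := by
          simp only [pvCnt_cons, pvCnt_nil] at h0; split_ifs at h0 <;> omega
        rw [show can_watch_all_shows_go [a] ((s, e) :: r) = can_watch_all_shows_go [a, (s, e)] r by
          norm_num [can_watch_all_shows_go]]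
        refine key [a, (s, e)] (by simp) ?_ (by omega)
        intro x hx
        have h1 := hcr x hx
        have h2 : pvCnt done x.1 ≤ 1 := le_trans (pvCnt_mono done (hsle x hx)) hd1
        rw [pvCnt_append]
        simp only [pvCnt_cons, pvCnt_nil] at h1 ⊢
        split_ifs at h1 ⊢ <;> omega
      · rcases tvs with _ | ⟨c, tvs⟩
        · -- tvs = [a, b]
          by_cases hA : a.2 < s
          · -- tvs.pop(0)
            have hd1 : pvCnt done s ≤ 1 := by
              simp only [pvCnt_cons, pvCnt_nil] at h0; split_ifs at h0 <;> omega
            rw [show can_watch_all_shows_go [a, b] ((s, e) :: r) =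
                can_watch_all_shows_go [b, (s, e)] r by
              norm_num [can_watch_all_shows_go, PySem.List.pyGetD, PySem.List.pop?,
                PySem.List.pyIdx?, hA]]
            refine key [b, (s, e)] (by simp) ?_ (by omega)
            intro x hx
            have h1 := hcr x hx
            have hsx := hsle x hx
            have h2 : pvCnt done x.1 ≤ 1 := le_trans (pvCnt_mono done hsx) hd1
            rw [pvCnt_append]
            simp only [pvCnt_cons, pvCnt_nil] at h1 ⊢
            split_ifs at h1 ⊢ <;> omega
          · by_cases hB : b.2 < s
            · -- tvs.pop(1)
              have hd1 : pvCnt done s ≤ 1 := by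
                simp only [pvCnt_cons, pvCnt_nil] at h0; split_ifs at h0 <;> omega
              rw [show can_watch_all_shows_go [a, b] ((s, e) :: r) =
                  can_watch_all_shows_go [a, (s, e)] r by
                norm_num [can_watch_all_shows_go, PySem.List.pyGetD, PySem.List.pop?,
                  PySem.List.pyIdx?, hA, hB]]
              refine key [a, (s, e)] (by simp) ?_ (by omega)
              intro x hx
              have h1 := hcr x hx
              have hsx := hsle x hx
              have h2 : pvCnt done x.1 ≤ 1 := le_trans (pvCnt_mono done hsx) hd1
              rw [pvCnt_append]
              simp only [pvCnt_cons, pvCnt_nil] at h1 ⊢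
              split_ifs at h1 ⊢ <;> omega
            · -- both TVs busy: "NO" on both sides
              have h2 : 2 ≤ pvCnt done s := by
                simp only [pvCnt_cons, pvCnt_nil] at h0; split_ifs at h0 <;> omega
              rw [show can_watch_all_shows_go [a, b] ((s, e) :: r) = "NO" by
                norm_num [can_watch_all_shows_go, PySem.List.pyGetD, PySem.List.pop?,
                  PySem.List.pyIdx?, hA, hB]]
              simp [pvBGo, h2]
        · simp at hlen

-- pvBusy over the split list, in terms of pvCnt of the prefix
lemma pvBusy_split (done : List (Int × Int)) (s e : Int) (r : List (Int × Int)) :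
    pvBusy (done ++ (s, e) :: r) done.length = pvCnt done s := by
  unfold pvBusy pvCnt
  rw [PySem.List.slice_to_natCast, PySem.List.pyGetD_natCast, List.take_left]
  have hget : (done ++ (s, e) :: r).getD done.length (0, 0) = (s, e) := by
    simp
  rw [hget]

-- pvBGo equals B's any-over-indices scan of done ++ rest, offset by the prefix length
lemma bgo_eq_any (rest : List (Int × Int)) : ∀ (done : List (Int × Int)),
    pvBGo done rest =
      if (List.range rest.length).any
          (fun i => 2 ≤ pvBusy (done ++ rest) (done.length + i)) then "NO" else "YES" := by
  induction rest with
  | nil => intro done; simp [pvBGo]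
  | cons hd r ih =>
    obtain ⟨s, e⟩ := hd
    intro done
    have hsplit : done ++ (s, e) :: r = (done ++ [(s, e)]) ++ r := by simp
    have hlen : ∀ i : Nat, done.length + (i + 1) = (done ++ [(s, e)]).length + i := by
      intro i; simp; omega
    rw [show pvBGo done ((s, e) :: r) =
        if 2 ≤ pvCnt done s then "NO" else pvBGo (done ++ [(s, e)]) r from rfl]
    rw [List.length_cons, List.range_succ_eq_map, List.any_cons, List.any_map]
    by_cases hg : 2 ≤ pvCnt done s
    · simp [hg, pvBusy_split done s e r]
    · rw [if_neg hg, ih (done ++ [(s, e)])]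
      have hshift : ∀ i : Nat, pvBusy (done ++ (s, e) :: r) (done.length + (i + 1)) =
          pvBusy ((done ++ [(s, e)]) ++ r) ((done ++ [(s, e)]).length + i) := by
        intro i
        rw [hsplit, hlen i]
      have h0 : decide (2 ≤ pvBusy (done ++ (s, e) :: r) (done.length + 0)) = false := by
        simp only [Nat.add_zero]
        simpa [pvBusy_split] using hg
      simp only [Function.comp_def, Nat.succ_eq_add_one, h0, Bool.false_or]
      simp only [← hshift]

-- ===== VERDICT (by name: the statement is the Claim_ definition above) =====
theorem can_watch_all_shows_spec : Claim_equal_can_watch_all_shows := by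
  intro n shows _
  unfold Spec_can_watch_all_shows can_watch_all_shows can_watch_all_shows_alt
  rw [go_eq_bgo _ [] [] (PySem.List.sorted_pairwise ..) (by simp)
    (by intro x _; simp [pvCnt])]
  rw [bgo_eq_any _ []]
  simp
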